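-- pv_equiv track=rewrite | github.com/rigatospan/Advert-of-Code | 2023/d19_23_p2.py | dfs
-- ===== SOURCE A (Python) =====
-- def sum_a_leaf(state):
--     '''return the product of the ranges of the intervals in the state
--     '''
--     values = [int(state[char][1])-int(state[char][0])+1 for char in state]
--     p=1
--     for v in values:
--         p*=v
--     return p
--
-- def return_intervals(low, high, value, operand):
--     '''split the interval (low, high)into two intervals
--     w.r.t the value and the operand
--     '''
--     if operand == '<' and value > low:
--         if value < high:
--             return (low, value-1) , (value, high)
--         else:
--             return (low, high) , None
--
--     if operand == '>' and value < high:
--         if value > low: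
--             return (value+1, high) , (low, value)
--         else:
--             return (low, high), None
--
--     return None, None
--
-- def dfs(state_xmas, node, workflows):
--     '''return the sum of the accepted leafs that are reached from the current node and state
--     '''
--
--     # check if we are at a leaf
--     if node == 'A':
--         return  sum_a_leaf(state_xmas)
--     if node == 'R':
--         return 0
--
--     command = workflows[node]
--     # sum the accepted values in the current node
--     s = 0
--
--     # store the values of the current state so that we reset it when we have finished with that node
--     current_state = {char: values for char, values in state_xmas.items()}
--
--     for condition in command:
--
--         if len(condition) == 1:
--             s+= dfs(state_xmas, condition[0], workflows)
--             continue
--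
--         # find the childrens of node and the new state that leads to them
--         cond, next_node = condition
--         char, operand, value = cond[0], cond[1], int(cond[2:])
--         low, high = state_xmas[char]
--
--         # new_interval is for the current examined child, while next_interval is the complementary interval
--         # to update the state of the node for the next child
--         new_interval, next_interval = return_intervals(low, high, value, operand)
--
--         # if it is a valid interval go to the child
--         if new_interval:
--
--             # update the state for the child
--             state_xmas[char] = new_interval
--             s += dfs(state_xmas, next_node,  workflows)
--
--             # after finishing with the child update the state of the node
--             if next_interval:
--                 state_xmas[char] =  next_interval
--             # if there is no interval left stop the iteration through the childs of the node
--             else: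
--                 break
--
--     # reset the state to that that entered the node after the dfs is finished for that node
--     for char in state_xmas:
--         state_xmas[char] = current_state[char]
--
--     return s
-- ===== SOURCE B (Python) =====
-- def dfs(state_xmas, node, workflows):
--     '''return the sum of the accepted leafs that are reached from the current node and state
--     (iterative re-implementation: explicit work stack instead of recursion with mutate-and-reset)
--     '''
--     total = 0
--     stack = [(node, dict(state_xmas))]
--     while stack:
--         n, st = stack.pop()
--         if n == 'A':
--             p = 1
--             for low, high in st.values():
--                 p *= high - low + 1
--             total += p
--             continue
--         if n == 'R':
--             continue
--         for condition in workflows[n]: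
--             if len(condition) == 1:
--                 stack.append((condition[0], dict(st)))
--                 continue
--             cond, nxt = condition
--             char, op, value = cond[0], cond[1], int(cond[2:])
--             low, high = st[char]
--             if op == '<' and low < value:
--                 # branch that satisfies the test goes to nxt
--                 stack.append((nxt, {**st, char: (low, value - 1 if value < high else high)}))
--                 if value >= high:
--                     break  # nothing of the interval remains
--                 st = {**st, char: (value, high)}
--             elif op == '>' and value < high:
--                 stack.append((nxt, {**st, char: (value + 1 if value > low else low, high)}))
--                 if value <= low:
--                     break
--                 st = {**st, char: (low, value)}
--     return total
-- ===== Notes on version B (the rewrite author's own statement) =====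
-- stated objective: alternative
-- what changed: Replaces A's recursion with per-node mutate-and-reset of the shared state dict by an iterative worklist: an explicit stack of (node, fresh state copy) pairs popped in a loop, pushing one shrunken-interval state per matching branch and accumulating the leaf products in a single total.
-- outside the precondition, e.g. on dfs({'x': (5, 9)}, 'b', {'b': [['x<1', 'b'], ['A']]}): A returns 5, B returns 5; on dfs({'x': (1, 5)}, 'b', {'b': [['x<10', 'A'], ['q>q', 'A']]}): A returns 5, B returns 5
import Mathlib
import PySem

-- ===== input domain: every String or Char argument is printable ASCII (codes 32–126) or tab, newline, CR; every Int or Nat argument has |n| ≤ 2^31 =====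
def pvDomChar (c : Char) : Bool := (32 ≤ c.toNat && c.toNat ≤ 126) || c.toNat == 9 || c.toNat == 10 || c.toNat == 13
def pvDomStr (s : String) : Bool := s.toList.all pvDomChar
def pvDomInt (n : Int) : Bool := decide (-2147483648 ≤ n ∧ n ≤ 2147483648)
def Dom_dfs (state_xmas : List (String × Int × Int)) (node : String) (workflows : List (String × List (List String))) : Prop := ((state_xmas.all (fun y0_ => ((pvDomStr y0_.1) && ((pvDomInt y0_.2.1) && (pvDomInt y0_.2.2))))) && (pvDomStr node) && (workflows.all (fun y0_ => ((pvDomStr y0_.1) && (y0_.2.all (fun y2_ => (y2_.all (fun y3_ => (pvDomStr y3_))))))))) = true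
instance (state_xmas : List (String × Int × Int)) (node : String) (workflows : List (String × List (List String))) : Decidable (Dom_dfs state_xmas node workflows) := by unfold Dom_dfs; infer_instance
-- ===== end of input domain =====

-- B replaces A's recursion-with-mutate-and-reset by an explicit work stack of (node, state) pairs
-- (objective: alternative decomposition).  A mutates state_xmas during the walk but fully restores
-- it before returning, so only the return value is observable; the equivalence is about the return value.

-- ===== PORT A =====
-- sum_a_leaf: product over the dict entries of high - low + 1 (dict keys are unique: the
-- 'for char in state' lookup loop reads exactly the items in order)
def pvSumALeaf (state : PySem.Dict String (Int × Int)) : Int :=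
  let values := state.items.map (fun kv => kv.2.2 - kv.2.1 + 1)
  values.foldl (fun p v => p * v) 1

-- return_intervals(low, high, value, operand)
def pvReturnIntervals (low high value : Int) (operand : Char) :
    Option (Int × Int) × Option (Int × Int) :=
  if operand = '<' ∧ low < value then
    if value < high then ((some (low, value - 1)), some (value, high)) else (some (low, high), none)
  else if operand = '>' ∧ value < high then
    if low < value then (some (value + 1, high), some (low, value)) else (some (low, high), none)
  else (none, none)

-- one iteration of A's 'for condition in command' loop; acc = (state, s, broken);
-- 'broken' records the Python 'break'; 'rec' is the recursive dfs call with the remaining fuel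
def pvStepA (rec : PySem.Dict String (Int × Int) → String → Int)
    (acc : PySem.Dict String (Int × Int) × Int × Bool) (condition : List String) :
    PySem.Dict String (Int × Int) × Int × Bool :=
  if acc.2.2 then acc
  else if condition.length = 1 then
    (acc.1, acc.2.1 + rec acc.1 ((PySem.List.pyGet? condition 0).getD ""), false)
  else
    let cond := (PySem.List.pyGet? condition 0).getD ""
    let next_node := (PySem.List.pyGet? condition 1).getD ""
    let char := String.ofList [(PySem.Str.pyGet? cond 0).getD ' ']
    let operand := (PySem.Str.pyGet? cond 1).getD ' '
    let value := (PySem.Int.ofStr? (PySem.Str.slice cond (some 2) none)).getD 0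
    let lh := (acc.1.get? char).getD (0, 0)
    let r := pvReturnIntervals lh.1 lh.2 value operand
    match r.1 with
    | none => (acc.1, acc.2.1, false)
    | some ni =>
      let st' := acc.1.insert char ni
      let s' := acc.2.1 + rec st' next_node
      match r.2 with
      | some xi => (st'.insert char xi, s', false)
      | none => (st', s', true)

-- dfs with a fuel counter making the recursion total; the final state-reset loop of A only
-- restores the mutated argument and does not affect the return value, so it has no counterpart
def dfsA : Nat → PySem.Dict String (Int × Int) → String → PySem.Dict String (List (List String)) → Int
  | 0, _, _, _ => 0
  | f + 1, state, node, wf =>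
    if node = "A" then pvSumALeaf state
    else if node = "R" then 0
    else
      ((((wf.get? node).getD []).foldl (pvStepA (fun st nd => dfsA f st nd wf)) (state, 0, false))).2.1

-- fuel workflows.length + 2 is a totality guard only: within Pre_dfs the workflow graph is
-- acyclic, so every chain of workflow nodes is shorter than this bound
def dfs (state_xmas : List (String × Int × Int)) (node : String) (workflows : List (String × List (List String))) : Int :=
  dfsA (workflows.length + 2) (PySem.Dict.mk state_xmas) node (PySem.Dict.mk workflows)

-- ===== PORT B =====
-- the inline 'p *= high - low + 1 over st.values()' product
def pvProdState (st : PySem.Dict String (Int × Int)) : Int :=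
  st.values.foldl (fun p lh => p * (lh.2 - lh.1 + 1)) 1

-- one iteration of B's condition loop; acc = (st, pushes, broken); pushes are consed so the
-- head is the last append (= next pop of the Python list-stack)
def pvStepB (acc : PySem.Dict String (Int × Int) × List (String × PySem.Dict String (Int × Int)) × Bool)
    (condition : List String) :
    PySem.Dict String (Int × Int) × List (String × PySem.Dict String (Int × Int)) × Bool :=
  if acc.2.2 then acc
  else if condition.length = 1 then
    (acc.1, ((PySem.List.pyGet? condition 0).getD "", acc.1) :: acc.2.1, false)
  else
    let cond := (PySem.List.pyGet? condition 0).getD ""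
    let nxt := (PySem.List.pyGet? condition 1).getD ""
    let char := String.ofList [(PySem.Str.pyGet? cond 0).getD ' ']
    let op := (PySem.Str.pyGet? cond 1).getD ' '
    let value := (PySem.Int.ofStr? (PySem.Str.slice cond (some 2) none)).getD 0
    let lh := (acc.1.get? char).getD (0, 0)
    if op = '<' ∧ lh.1 < value then
      let pushes := (nxt, acc.1.insert char (lh.1, if value < lh.2 then value - 1 else lh.2)) :: acc.2.1
      if lh.2 ≤ value then (acc.1, pushes, true)
      else (acc.1.insert char (value, lh.2), pushes, false)
    else if op = '>' ∧ value < lh.2 then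
      let pushes := (nxt, acc.1.insert char ((if lh.1 < value then value + 1 else lh.1), lh.2)) :: acc.2.1
      if value ≤ lh.1 then (acc.1, pushes, true)
      else (acc.1.insert char (lh.1, value), pushes, false)
    else acc

-- B's 'while stack' loop, with a fuel counter as a totality guard only
def dfsB : Nat → PySem.Dict String (List (List String)) → List (String × PySem.Dict String (Int × Int)) → Int → Int
  | 0, _, _, total => total
  | f + 1, wf, stack, total =>
    match stack with
    | [] => total
    | (n, st) :: rest =>
      if n = "A" then dfsB f wf rest (total + pvProdState st)
      else if n = "R" then dfsB f wf rest total
      else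
        let r := ((wf.get? n).getD []).foldl pvStepB (st, [], false)
        dfsB f wf (r.2.1 ++ rest) total

def dfs_alt (state_xmas : List (String × Int × Int)) (node : String) (workflows : List (String × List (List String))) : Int :=
  -- fuel: within Pre_dfs the workflow graph is acyclic, so this bound is never reached
  let c := (workflows.map (fun w => w.2.length)).foldl (· + ·) 0 + 1
  dfsB ((c + 1) ^ (workflows.length + 2)) (PySem.Dict.mk workflows) [(node, PySem.Dict.mk state_xmas)] 0

-- ===== PRECONDITION & SPEC =====
-- the target a condition sends the search to: its only entry for a bare [target] condition,
-- its second entry for a [test, target] condition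
def pvCondTgt (c : List String) : String :=
  if c.length = 1 then (PySem.List.pyGet? c 0).getD "" else (PySem.List.pyGet? c 1).getD ""

-- all targets reachable in one step from node n
def pvTgts (W : List (String × List (List String))) (n : String) : List String :=
  (((PySem.Dict.mk W).get? n).getD []).map pvCondTgt

-- fuel-bounded longest-path depth of a node in the workflow graph ("A"/"R" are leaves)
def pvDepth (W : List (String × List (List String))) : Nat → String → Nat
  | 0, _ => 0
  | f + 1, n =>
    if n = "A" ∨ n = "R" then 0
    else (pvTgts W n).foldl (fun m t => max m (pvDepth W f t + 1)) 0

-- acyclicity of the workflow graph, stated checkably: the longest-path depth has stabilised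
-- (on a cyclic graph the depth at a node of the cycle keeps growing with the fuel)
def PvStab (W : List (String × List (List String))) : Prop :=
  ∀ n ∈ W.map (·.1), pvDepth W (W.length + 1) n = pvDepth W (W.length + 2) n

-- a node reference must resolve: the accept/reject leaves or a workflow name
abbrev pvOkTail (W : List (String × List (List String))) (t : String) : Prop :=
  t = "A" ∨ t = "R" ∨ t ∈ W.map (·.1)

-- one workflow condition: either a bare target, or a "cNNN"-style test whose variable is a
-- state key and whose numeric part parses as a Python int
abbrev pvOkCond (K : List String) (c : List String) : Prop :=
  c.length = 1 ∨
  (c.length = 2 ∧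
    String.ofList [(PySem.Str.pyGet? ((PySem.List.pyGet? c 0).getD "") 0).getD ' '] ∈ K ∧
    (PySem.Int.ofStr? (PySem.Str.slice ((PySem.List.pyGet? c 0).getD "") (some 2) none)).isSome = true)

abbrev pvWfOk (K : List String) (W : List (String × List (List String))) : Prop :=
  ∀ e ∈ W, ∀ c ∈ e.2, pvOkCond K c ∧ pvOkTail W (pvCondTgt c)

-- Pre_dfs excludes (a) inputs on which A raises (an unresolvable node name → KeyError, a test
-- variable absent from the state → KeyError, a condition of length ≠ 1,2 → ValueError, a numeric
-- part int() cannot parse → ValueError); (b) workflow graphs with a cycle, on which A's recursion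
-- can run forever (RecursionError) — whether a particular cycle is actually entered depends on the
-- interval values, so acyclicity of the whole graph is required, which also excludes some inputs
-- whose cycle is never reached and on which A does return (see the cites in the claim, including
-- a malformed condition sitting after a 'break'); (c) duplicate keys in either dict argument,
-- where the association-list reading of a Python dict is ambiguous.  At the leaves "A"/"R" the
-- workflows are never read and nothing is required of them.
def Pre_dfs (state_xmas : List (String × Int × Int)) (node : String) (workflows : List (String × List (List String))) : Prop :=
  (state_xmas.map (·.1)).Nodup ∧
  (node = "A" ∨ node = "R" ∨
    (node ∈ workflows.map (·.1) ∧ (workflows.map (·.1)).Nodup ∧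
      pvWfOk (state_xmas.map (·.1)) workflows ∧ PvStab workflows))
instance (state_xmas : List (String × Int × Int)) (node : String) (workflows : List (String × List (List String))) : Decidable (Pre_dfs state_xmas node workflows) := by unfold Pre_dfs PvStab; infer_instance

def pvWitness_dfs : (List (String × Int × Int)) × String × (List (String × List (List String))) :=
  ([("x", 1, 4)], "in", [("in", [["x<3", "A"], ["R"]])])

def Spec_dfs (state_xmas : List (String × Int × Int)) (node : String) (workflows : List (String × List (List String))) (out : Int) : Prop := out = dfs_alt state_xmas node workflows
instance (state_xmas : List (String × Int × Int)) (node : String) (workflows : List (String × List (List String))) (out : Int) : Decidable (Spec_dfs state_xmas node workflows out) := by unfold Spec_dfs; infer_instance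

-- ===== CLAIM (what is proved, stated in full; the proofs are below) =====
def Claim_equal_dfs : Prop := ∀ (state_xmas : List (String × Int × Int)) (node : String) (workflows : List (String × List (List String))), Dom_dfs state_xmas node workflows → Pre_dfs state_xmas node workflows → Spec_dfs state_xmas node workflows (dfs state_xmas node workflows)

-- ===== LEMMAS AND PROOFS =====

-- the depth at the saturating fuel; the acyclicity condition PvStab below makes it a fixpoint
def pvWt (W : List (String × List (List String))) (n : String) : Nat :=
  pvDepth W (W.length + 1) n


-- B's loop on an empty stack returns the total for any fuel
theorem dfsB_nil (f : Nat) (wf : PySem.Dict String (List (List String))) (total : Int) :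
    dfsB f wf [] total = total := by
  cases f <;> rfl

-- one-step unfolding of A's fueled recursion
theorem dfsA_succ (f : Nat) (st : PySem.Dict String (Int × Int)) (node : String)
    (wf : PySem.Dict String (List (List String))) :
    dfsA (f + 1) st node wf
      = if node = "A" then pvSumALeaf st
        else if node = "R" then 0
        else ((((wf.get? node).getD []).foldl (pvStepA (fun st nd => dfsA f st nd wf)) (st, 0, false))).2.1 := rfl

-- the two leaf products coincide
theorem pvProd_eq_sum_a_leaf (st : PySem.Dict String (Int × Int)) : pvProdState st = pvSumALeaf st := by
  simp [pvProdState, pvSumALeaf, PySem.Dict.values, List.foldl_map]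

-- foldl-max facts
theorem pvFoldMax_init_le (g : String → Nat) :
    ∀ (l : List String) (a : Nat), a ≤ l.foldl (fun m t => max m (g t + 1)) a := by
  intro l
  induction l with
  | nil => intro a; simp
  | cons x l ih =>
    intro a
    calc a ≤ max a (g x + 1) := le_max_left _ _
    _ ≤ l.foldl (fun m t => max m (g t + 1)) (max a (g x + 1)) := ih _

theorem pvFoldMax_mem_le (g : String → Nat) (t : String) :
    ∀ (l : List String) (a : Nat), t ∈ l → g t + 1 ≤ l.foldl (fun m t => max m (g t + 1)) a := by
  intro l
  induction l with
  | nil => intro a h; simp at h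
  | cons x l ih =>
    intro a h
    rcases List.mem_cons.mp h with h | h
    · subst h
      calc g t + 1 ≤ max a (g t + 1) := le_max_right _ _
      _ ≤ l.foldl (fun m t => max m (g t + 1)) (max a (g t + 1)) := pvFoldMax_init_le g l _
    · exact ih _ h

theorem pvFoldMax_le (g : String → Nat) (b : Nat) :
    ∀ (l : List String) (a : Nat), a ≤ b → (∀ t ∈ l, g t + 1 ≤ b) →
      l.foldl (fun m t => max m (g t + 1)) a ≤ b := by
  intro l
  induction l with
  | nil => intro a ha _; simpa using ha
  | cons x l ih =>
    intro a ha hl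
    exact ih _ (max_le ha (hl x (by simp))) (fun t ht => hl t (by simp [ht]))

-- the fuelled depth is bounded by the fuel
theorem pvDepth_le_fuel (W : List (String × List (List String))) :
    ∀ (f : Nat) (n : String), pvDepth W f n ≤ f := by
  intro f
  induction f with
  | zero => intro n; simp [pvDepth]
  | succ f ih =>
    intro n
    simp only [pvDepth]
    split
    · omega
    · exact pvFoldMax_le _ _ _ _ (by omega) (fun t _ => by have := ih t; omega)

theorem pvWt_le (W : List (String × List (List String))) (n : String) : pvWt W n ≤ W.length + 1 :=
  pvDepth_le_fuel W _ n

theorem pvWt_A (W : List (String × List (List String))) : pvWt W "A" = 0 := by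
  simp [pvWt, pvDepth]

theorem pvWt_R (W : List (String × List (List String))) : pvWt W "R" = 0 := by
  simp [pvWt, pvDepth]

-- decomposition of W at a key node (first match, as PySem.Dict.get? looks up)
theorem pvFind_entry (W : List (String × List (List String))) (n : String)
    (hmem : n ∈ W.map (·.1)) :
    ∃ e ∈ W, e.1 = n ∧ (PySem.Dict.mk W).get? n = some e.2 := by
  induction W with
  | nil => simp at hmem
  | cons e₀ rest ih =>
    by_cases h0 : e₀.1 = n
    · refine ⟨e₀, by simp, h0, ?_⟩
      rw [show (e₀ :: rest) = ((e₀.1, e₀.2) :: rest) by simp]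
      rw [PySem.Dict.get?_mk_cons]
      simp [h0]
    · have hmem' : n ∈ rest.map (·.1) := by
        simp only [List.map_cons, List.mem_cons] at hmem
        rcases hmem with h | h
        · exact absurd h.symm h0
        · exact h
      obtain ⟨e, he, he1, hget⟩ := ih hmem'
      refine ⟨e, by simp [he], he1, ?_⟩
      rw [show (e₀ :: rest) = ((e₀.1, e₀.2) :: rest) by simp]
      rw [PySem.Dict.get?_mk_cons]
      simp only [beq_iff_eq, if_neg h0]
      exact hget

-- under acyclicity, every edge of the workflow graph strictly decreases the weight
theorem pvWt_edge (W : List (String × List (List String))) (hstab : PvStab W)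
    (n : String) (hmem : n ∈ W.map (·.1)) (hA : n ≠ "A") (hR : n ≠ "R")
    (t : String) (ht : t ∈ pvTgts W n) : pvWt W t < pvWt W n := by
  have h1 : pvDepth W (W.length + 1) n = pvDepth W (W.length + 2) n := hstab n hmem
  have h2 : pvDepth W (W.length + 2) n
      = (pvTgts W n).foldl (fun m t => max m (pvDepth W (W.length + 1) t + 1)) 0 := by
    show pvDepth W ((W.length + 1) + 1) n = _
    simp only [pvDepth, if_neg (by tauto : ¬(n = "A" ∨ n = "R"))]
  have h3 : pvDepth W (W.length + 1) t + 1
      ≤ (pvTgts W n).foldl (fun m t => max m (pvDepth W (W.length + 1) t + 1)) 0 :=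
    pvFoldMax_mem_le _ t _ 0 ht
  unfold pvWt
  omega

-- (L1) fuel stability of A's port: any two fuels above the node's weight give the same value
theorem dfsA_stable (W : List (String × List (List String))) (K : List String)
    (hwf : pvWfOk K W) (hstab : PvStab W) :
    ∀ n, pvOkTail W n →
      ∀ st f g, pvWt W n < f → pvWt W n < g →
        dfsA f st n (PySem.Dict.mk W) = dfsA g st n (PySem.Dict.mk W) := by
  suffices H : ∀ k n, pvOkTail W n → pvWt W n ≤ k → ∀ st f g, pvWt W n < f → pvWt W n < g →
      dfsA f st n (PySem.Dict.mk W) = dfsA g st n (PySem.Dict.mk W) by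
    exact fun n h => H (pvWt W n) n h le_rfl
  intro k
  induction k with
  | zero =>
    intro n hgood hwt st f g hf hg
    obtain ⟨f', rfl⟩ : ∃ f', f = f' + 1 := ⟨f - 1, by omega⟩
    obtain ⟨g', rfl⟩ : ∃ g', g = g' + 1 := ⟨g - 1, by omega⟩
    by_cases hA : n = "A"
    · simp [dfsA, hA]
    by_cases hR : n = "R"
    · simp [dfsA, hR]
    rcases hgood with h | h | hmem
    · exact absurd h hA
    · exact absurd h hR
    obtain ⟨e, heW, he1, hget⟩ := pvFind_entry W n hmem
    have hnil : e.2 = [] := by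
      cases hcmds : e.2 with
      | nil => rfl
      | cons c cs =>
        exfalso
        have ht : pvCondTgt c ∈ pvTgts W n := by
          unfold pvTgts
          rw [hget]
          exact List.mem_map.mpr ⟨c, by simp [hcmds], rfl⟩
        have := pvWt_edge W hstab n hmem hA hR _ ht
        omega
    simp [dfsA, hA, hR, hget, hnil]
  | succ k ih =>
    intro n hgood hwt st f g hf hg
    obtain ⟨f', rfl⟩ : ∃ f', f = f' + 1 := ⟨f - 1, by omega⟩
    obtain ⟨g', rfl⟩ : ∃ g', g = g' + 1 := ⟨g - 1, by omega⟩
    by_cases hA : n = "A"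
    · simp [dfsA, hA]
    by_cases hR : n = "R"
    · simp [dfsA, hR]
    rcases hgood with h | h | hmem
    · exact absurd h hA
    · exact absurd h hR
    obtain ⟨e, heW, he1, hget⟩ := pvFind_entry W n hmem
    simp only [dfsA, if_neg hA, if_neg hR, hget, Option.getD_some]
    refine congrArg (fun x : PySem.Dict String (Int × Int) × Int × Bool => x.2.1) ?_
    apply PySem.List.foldl_congr_mem
    intro acc c hc
    have hcond := hwf e heW c hc
    have htgt : pvCondTgt c ∈ pvTgts W n := by
      unfold pvTgts
      rw [hget]
      exact List.mem_map.mpr ⟨c, hc, rfl⟩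
    have hwtt : pvWt W (pvCondTgt c) < pvWt W n := pvWt_edge W hstab n hmem hA hR _ htgt
    by_cases hbr : acc.2.2 = true
    · simp [pvStepA, hbr]
    rw [Bool.not_eq_true] at hbr
    by_cases hl1 : c.length = 1
    · have htcc : pvCondTgt c = (PySem.List.pyGet? c 0).getD "" := by
        simp [pvCondTgt, hl1]
      have hrec : ∀ st', dfsA f' st' ((PySem.List.pyGet? c 0).getD "") (PySem.Dict.mk W)
          = dfsA g' st' ((PySem.List.pyGet? c 0).getD "") (PySem.Dict.mk W) := by
        intro st'
        rw [← htcc]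
        exact ih _ (htcc ▸ hcond.2) (by omega) st' f' g' (by omega) (by omega)
      simp only [pvStepA, hbr, Bool.false_eq_true, if_false, hl1, if_true, hrec]
    · have htcc : pvCondTgt c = (PySem.List.pyGet? c 1).getD "" := by
        simp [pvCondTgt, hl1]
      have hrec : ∀ st', dfsA f' st' ((PySem.List.pyGet? c 1).getD "") (PySem.Dict.mk W)
          = dfsA g' st' ((PySem.List.pyGet? c 1).getD "") (PySem.Dict.mk W) := by
        intro st'
        rw [← htcc]
        exact ih _ (htcc ▸ hcond.2) (by omega) st' f' g' (by omega) (by omega)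
      simp only [pvStepA, hbr, Bool.false_eq_true, if_false, hl1, hrec]

-- once 'break' has happened both loops ignore the remaining conditions
theorem pvStepA_frozen (rec : PySem.Dict String (Int × Int) → String → Int) :
    ∀ (cmds : List (List String)) (acc : PySem.Dict String (Int × Int) × Int × Bool),
      acc.2.2 = true → cmds.foldl (pvStepA rec) acc = acc := by
  intro cmds
  induction cmds with
  | nil => intro acc h; rfl
  | cons c cmds ih =>
    intro acc h
    rw [List.foldl_cons, show pvStepA rec acc c = acc by simp [pvStepA, h]]
    exact ih acc h

theorem pvStepB_frozen :
    ∀ (cmds : List (List String)) (acc : PySem.Dict String (Int × Int) × List (String × PySem.Dict String (Int × Int)) × Bool),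
      acc.2.2 = true → cmds.foldl pvStepB acc = acc := by
  intro cmds
  induction cmds with
  | nil => intro acc h; rfl
  | cons c cmds ih =>
    intro acc h
    rw [List.foldl_cons, show pvStepB acc c = acc by simp [pvStepB, h]]
    exact ih acc h

-- (L2) fold correspondence on one node's condition list: A's loop accumulates exactly the
-- dfsA-values of the pairs B's loop pushes
theorem pvFold_corr (W : List (String × List (List String))) (K : List String)
    (hwf : pvWfOk K W) (hstab : PvStab W)
    (wN f : Nat) (hf : wN ≤ f) :
    ∀ (cmds : List (List String)),
      (∀ c ∈ cmds, pvOkTail W (pvCondTgt c) ∧ pvWt W (pvCondTgt c) < wN) →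
      ∀ st s pushes br,
        let a := cmds.foldl (pvStepA (fun st nd => dfsA f st nd (PySem.Dict.mk W))) (st, s, br)
        let b := cmds.foldl pvStepB (st, pushes, br)
        a.2.2 = b.2.2 ∧ (a.2.2 = false → a.1 = b.1) ∧
        ∃ newp, b.2.1 = newp ++ pushes ∧
          a.2.1 = s + (newp.map (fun p => dfsA (pvWt W p.1 + 1) p.2 p.1 (PySem.Dict.mk W))).sum ∧
          (∀ p ∈ newp, pvOkTail W p.1 ∧ pvWt W p.1 < wN) ∧
          newp.length ≤ cmds.length := by
  intro cmds
  induction cmds with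
  | nil =>
    intro _ st s pushes br
    exact ⟨rfl, fun _ => rfl, ⟨[], rfl, by simp, by simp, by simp⟩⟩
  | cons c cmds ih =>
    intro hcs st s pushes br
    have hcond := hcs c (by simp)
    have hcs' : ∀ c' ∈ cmds, pvOkTail W (pvCondTgt c') ∧ pvWt W (pvCondTgt c') < wN :=
      fun c' hc' => hcs c' (by simp [hc'])
    cases br with
    | true =>
      dsimp only
      rw [pvStepA_frozen _ _ _ rfl, pvStepB_frozen _ _ rfl]
      exact ⟨rfl, fun h => by simp at h, ⟨[], rfl, by simp, by simp, by simp⟩⟩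
    | false =>
      dsimp only
      rw [List.foldl_cons, List.foldl_cons]
      by_cases hl1 : c.length = 1
      · -- fallthrough condition: A recurses on the target, B pushes it, state unchanged
        have htcc : pvCondTgt c = (PySem.List.pyGet? c 0).getD "" := by
          simp [pvCondTgt, hl1]
        have hstabT : ∀ st', dfsA f st' ((PySem.List.pyGet? c 0).getD "") (PySem.Dict.mk W)
            = dfsA (pvWt W ((PySem.List.pyGet? c 0).getD "") + 1) st' ((PySem.List.pyGet? c 0).getD "") (PySem.Dict.mk W) := by
          intro st'
          rw [← htcc]
          exact dfsA_stable W K hwf hstab _ hcond.1 st' f _ (by omega) (by omega)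
        rw [show pvStepA (fun st nd => dfsA f st nd (PySem.Dict.mk W)) (st, s, false) c
            = (st, s + dfsA f st ((PySem.List.pyGet? c 0).getD "") (PySem.Dict.mk W), false) by
          simp only [pvStepA, Bool.false_eq_true, if_false, if_pos hl1]]
        rw [show pvStepB (st, pushes, false) c = (st, (((PySem.List.pyGet? c 0).getD ""), st) :: pushes, false) by
          simp only [pvStepB, Bool.false_eq_true, if_false, if_pos hl1]]
        have H := ih hcs' st (s + dfsA f st ((PySem.List.pyGet? c 0).getD "") (PySem.Dict.mk W)) ((((PySem.List.pyGet? c 0).getD ""), st) :: pushes) false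
        dsimp only at H
        obtain ⟨hfl, hst, newp, hpush, hsum, hgood, hlen⟩ := H
        refine ⟨hfl, hst, newp ++ [(((PySem.List.pyGet? c 0).getD ""), st)], ?_, ?_, ?_, ?_⟩
        · rw [hpush]; simp
        · rw [hsum, List.map_append, List.sum_append, hstabT st]
          simp; ring
        · intro p hp
          rcases List.mem_append.mp hp with h | h
          · exact hgood p h
          · rw [List.mem_singleton] at h; subst h
            exact ⟨htcc ▸ hcond.1, htcc ▸ hcond.2⟩
        · simp only [List.length_append, List.length_cons, List.length_nil] at hlen ⊢
          omega
      · -- test condition: parse it and split the interval exactly like A's return_intervals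
        have htcc : pvCondTgt c = (PySem.List.pyGet? c 1).getD "" := by
          simp [pvCondTgt, hl1]
        have hstabT : ∀ st', dfsA f st' ((PySem.List.pyGet? c 1).getD "") (PySem.Dict.mk W)
            = dfsA (pvWt W ((PySem.List.pyGet? c 1).getD "") + 1) st' ((PySem.List.pyGet? c 1).getD "") (PySem.Dict.mk W) := by
          intro st'
          rw [← htcc]
          exact dfsA_stable W K hwf hstab _ hcond.1 st' f _ (by omega) (by omega)
        have hgt : pvOkTail W ((PySem.List.pyGet? c 1).getD "") := htcc ▸ hcond.1
        have hwtt : pvWt W ((PySem.List.pyGet? c 1).getD "") < wN := htcc ▸ hcond.2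
        by_cases hm1 : ((PySem.Str.pyGet? ((PySem.List.pyGet? c 0).getD "") 1).getD ' ') = '<' ∧ ((st.get? (String.ofList [(PySem.Str.pyGet? ((PySem.List.pyGet? c 0).getD "") 0).getD ' '])).getD ((0 : Int), (0 : Int))).1 < ((PySem.Int.ofStr? (PySem.Str.slice ((PySem.List.pyGet? c 0).getD "") (some 2) none)).getD 0)
        · by_cases hm1b : ((PySem.Int.ofStr? (PySem.Str.slice ((PySem.List.pyGet? c 0).getD "") (some 2) none)).getD 0) < ((st.get? (String.ofList [(PySem.Str.pyGet? ((PySem.List.pyGet? c 0).getD "") 0).getD ' '])).getD ((0 : Int), (0 : Int))).2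
          · rw [show pvStepA (fun st nd => dfsA f st nd (PySem.Dict.mk W)) (st, s, false) c
                = (st.insert (String.ofList [(PySem.Str.pyGet? ((PySem.List.pyGet? c 0).getD "") 0).getD ' ']) (((PySem.Int.ofStr? (PySem.Str.slice ((PySem.List.pyGet? c 0).getD "") (some 2) none)).getD 0), ((st.get? (String.ofList [(PySem.Str.pyGet? ((PySem.List.pyGet? c 0).getD "") 0).getD ' '])).getD ((0 : Int), (0 : Int))).2),
                   s + dfsA f (st.insert (String.ofList [(PySem.Str.pyGet? ((PySem.List.pyGet? c 0).getD "") 0).getD ' ']) (((st.get? (String.ofList [(PySem.Str.pyGet? ((PySem.List.pyGet? c 0).getD "") 0).getD ' '])).getD ((0 : Int), (0 : Int))).1, ((PySem.Int.ofStr? (PySem.Str.slice ((PySem.List.pyGet? c 0).getD "") (some 2) none)).getD 0) - 1)) ((PySem.List.pyGet? c 1).getD "") (PySem.Dict.mk W), false) by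
              simp only [pvStepA, pvReturnIntervals, Bool.false_eq_true, if_false, if_neg hl1,
                if_pos hm1, if_pos hm1b, PySem.Dict.insert_insert_self]]
            rw [show pvStepB (st, pushes, false) c
                = (st.insert (String.ofList [(PySem.Str.pyGet? ((PySem.List.pyGet? c 0).getD "") 0).getD ' ']) (((PySem.Int.ofStr? (PySem.Str.slice ((PySem.List.pyGet? c 0).getD "") (some 2) none)).getD 0), ((st.get? (String.ofList [(PySem.Str.pyGet? ((PySem.List.pyGet? c 0).getD "") 0).getD ' '])).getD ((0 : Int), (0 : Int))).2),
                   (((PySem.List.pyGet? c 1).getD ""), st.insert (String.ofList [(PySem.Str.pyGet? ((PySem.List.pyGet? c 0).getD "") 0).getD ' ']) (((st.get? (String.ofList [(PySem.Str.pyGet? ((PySem.List.pyGet? c 0).getD "") 0).getD ' '])).getD ((0 : Int), (0 : Int))).1, ((PySem.Int.ofStr? (PySem.Str.slice ((PySem.List.pyGet? c 0).getD "") (some 2) none)).getD 0) - 1)) :: pushes, false) by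
              simp only [pvStepB, Bool.false_eq_true, if_false, if_neg hl1, if_pos hm1,
                if_pos hm1b, if_neg (not_le.mpr hm1b)]]
            have H := ih hcs' (st.insert (String.ofList [(PySem.Str.pyGet? ((PySem.List.pyGet? c 0).getD "") 0).getD ' ']) (((PySem.Int.ofStr? (PySem.Str.slice ((PySem.List.pyGet? c 0).getD "") (some 2) none)).getD 0), ((st.get? (String.ofList [(PySem.Str.pyGet? ((PySem.List.pyGet? c 0).getD "") 0).getD ' '])).getD ((0 : Int), (0 : Int))).2)) (s + dfsA f (st.insert (String.ofList [(PySem.Str.pyGet? ((PySem.List.pyGet? c 0).getD "") 0).getD ' ']) (((st.get? (String.ofList [(PySem.Str.pyGet? ((PySem.List.pyGet? c 0).getD "") 0).getD ' '])).getD ((0 : Int), (0 : Int))).1, ((PySem.Int.ofStr? (PySem.Str.slice ((PySem.List.pyGet? c 0).getD "") (some 2) none)).getD 0) - 1)) ((PySem.List.pyGet? c 1).getD "") (PySem.Dict.mk W)) ((((PySem.List.pyGet? c 1).getD ""), (st.insert (String.ofList [(PySem.Str.pyGet? ((PySem.List.pyGet? c 0).getD "") 0).getD ' ']) (((st.get?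 (String.ofList [(PySem.Str.pyGet? ((PySem.List.pyGet? c 0).getD "") 0).getD ' '])).getD ((0 : Int), (0 : Int))).1, ((PySem.Int.ofStr? (PySem.Str.slice ((PySem.List.pyGet? c 0).getD "") (some 2) none)).getD 0) - 1))) :: pushes) false
            dsimp only at H
            obtain ⟨hfl, hst, newp, hpush, hsum, hgood, hlen⟩ := H
            refine ⟨hfl, hst, newp ++ [(((PySem.List.pyGet? c 1).getD ""), (st.insert (String.ofList [(PySem.Str.pyGet? ((PySem.List.pyGet? c 0).getD "") 0).getD ' ']) (((st.get? (String.ofList [(PySem.Str.pyGet? ((PySem.List.pyGet? c 0).getD "") 0).getD ' '])).getD ((0 : Int), (0 : Int))).1, ((PySem.Int.ofStr? (PySem.Str.slice ((PySem.List.pyGet? c 0).getD "") (some 2) none)).getD 0) - 1)))], ?_, ?_, ?_, ?_⟩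
            · rw [hpush]; simp
            · rw [hsum, List.map_append, List.sum_append, hstabT (st.insert (String.ofList [(PySem.Str.pyGet? ((PySem.List.pyGet? c 0).getD "") 0).getD ' ']) (((st.get? (String.ofList [(PySem.Str.pyGet? ((PySem.List.pyGet? c 0).getD "") 0).getD ' '])).getD ((0 : Int), (0 : Int))).1, ((PySem.Int.ofStr? (PySem.Str.slice ((PySem.List.pyGet? c 0).getD "") (some 2) none)).getD 0) - 1))]
              simp; ring
            · intro p hp
              rcases List.mem_append.mp hp with h | h
              · exact hgood p h
              · rw [List.mem_singleton] at h; subst h; exact ⟨hgt, hwtt⟩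
            · simp only [List.length_append, List.length_cons, List.length_nil] at hlen ⊢
              omega
          · rw [show pvStepA (fun st nd => dfsA f st nd (PySem.Dict.mk W)) (st, s, false) c
                = (st.insert (String.ofList [(PySem.Str.pyGet? ((PySem.List.pyGet? c 0).getD "") 0).getD ' ']) (((st.get? (String.ofList [(PySem.Str.pyGet? ((PySem.List.pyGet? c 0).getD "") 0).getD ' '])).getD ((0 : Int), (0 : Int))).1, ((st.get? (String.ofList [(PySem.Str.pyGet? ((PySem.List.pyGet? c 0).getD "") 0).getD ' '])).getD ((0 : Int), (0 : Int))).2),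
                   s + dfsA f (st.insert (String.ofList [(PySem.Str.pyGet? ((PySem.List.pyGet? c 0).getD "") 0).getD ' ']) (((st.get? (String.ofList [(PySem.Str.pyGet? ((PySem.List.pyGet? c 0).getD "") 0).getD ' '])).getD ((0 : Int), (0 : Int))).1, ((st.get? (String.ofList [(PySem.Str.pyGet? ((PySem.List.pyGet? c 0).getD "") 0).getD ' '])).getD ((0 : Int), (0 : Int))).2)) ((PySem.List.pyGet? c 1).getD "") (PySem.Dict.mk W), true) by
              simp only [pvStepA, pvReturnIntervals, Bool.false_eq_true, if_false, if_neg hl1,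
                if_pos hm1, if_neg hm1b]]
            rw [show pvStepB (st, pushes, false) c
                = (st, (((PySem.List.pyGet? c 1).getD ""), st.insert (String.ofList [(PySem.Str.pyGet? ((PySem.List.pyGet? c 0).getD "") 0).getD ' ']) (((st.get? (String.ofList [(PySem.Str.pyGet? ((PySem.List.pyGet? c 0).getD "") 0).getD ' '])).getD ((0 : Int), (0 : Int))).1, ((st.get? (String.ofList [(PySem.Str.pyGet? ((PySem.List.pyGet? c 0).getD "") 0).getD ' '])).getD ((0 : Int), (0 : Int))).2)) :: pushes, true) by
              simp only [pvStepB, Bool.false_eq_true, if_false, if_neg hl1, if_pos hm1,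
                if_neg hm1b, if_pos (not_lt.mp hm1b)]]
            rw [pvStepA_frozen _ cmds _ rfl, pvStepB_frozen cmds _ rfl]
            refine ⟨rfl, fun h => by simp at h, ⟨[(((PySem.List.pyGet? c 1).getD ""), (st.insert (String.ofList [(PySem.Str.pyGet? ((PySem.List.pyGet? c 0).getD "") 0).getD ' ']) (((st.get? (String.ofList [(PySem.Str.pyGet? ((PySem.List.pyGet? c 0).getD "") 0).getD ' '])).getD ((0 : Int), (0 : Int))).1, ((st.get? (String.ofList [(PySem.Str.pyGet? ((PySem.List.pyGet? c 0).getD "") 0).getD ' '])).getD ((0 : Int), (0 : Int))).2)))], rfl, ?_, ?_, by simp⟩⟩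
            · rw [List.map_singleton, List.sum_singleton, hstabT (st.insert (String.ofList [(PySem.Str.pyGet? ((PySem.List.pyGet? c 0).getD "") 0).getD ' ']) (((st.get? (String.ofList [(PySem.Str.pyGet? ((PySem.List.pyGet? c 0).getD "") 0).getD ' '])).getD ((0 : Int), (0 : Int))).1, ((st.get? (String.ofList [(PySem.Str.pyGet? ((PySem.List.pyGet? c 0).getD "") 0).getD ' '])).getD ((0 : Int), (0 : Int))).2))]
            · intro p hp
              rw [List.mem_singleton] at hp; subst hp; exact ⟨hgt, hwtt⟩
        · by_cases hm2 : ((PySem.Str.pyGet? ((PySem.List.pyGet? c 0).getD "") 1).getD ' ') = '>' ∧ ((PySem.Int.ofStr? (PySem.Str.slice ((PySem.List.pyGet? c 0).getD "") (some 2) none)).getD 0) < ((st.get? (String.ofList [(PySem.Str.pyGet? ((PySem.List.pyGet? c 0).getD "") 0).getD ' '])).getD ((0 : Int), (0 : Int))).2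
          · by_cases hm2b : ((st.get? (String.ofList [(PySem.Str.pyGet? ((PySem.List.pyGet? c 0).getD "") 0).getD ' '])).getD ((0 : Int), (0 : Int))).1 < ((PySem.Int.ofStr? (PySem.Str.slice ((PySem.List.pyGet? c 0).getD "") (some 2) none)).getD 0)
            · rw [show pvStepA (fun st nd => dfsA f st nd (PySem.Dict.mk W)) (st, s, false) c
                  = (st.insert (String.ofList [(PySem.Str.pyGet? ((PySem.List.pyGet? c 0).getD "") 0).getD ' ']) (((st.get? (String.ofList [(PySem.Str.pyGet? ((PySem.List.pyGet? c 0).getD "") 0).getD ' '])).getD ((0 : Int), (0 : Int))).1, ((PySem.Int.ofStr? (PySem.Str.slice ((PySem.List.pyGet? c 0).getD "") (some 2) none)).getD 0)),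
                     s + dfsA f (st.insert (String.ofList [(PySem.Str.pyGet? ((PySem.List.pyGet? c 0).getD "") 0).getD ' ']) (((PySem.Int.ofStr? (PySem.Str.slice ((PySem.List.pyGet? c 0).getD "") (some 2) none)).getD 0) + 1, ((st.get? (String.ofList [(PySem.Str.pyGet? ((PySem.List.pyGet? c 0).getD "") 0).getD ' '])).getD ((0 : Int), (0 : Int))).2)) ((PySem.List.pyGet? c 1).getD "") (PySem.Dict.mk W), false) by
                simp only [pvStepA, pvReturnIntervals, Bool.false_eq_true, if_false, if_neg hl1,
                  if_neg hm1, if_pos hm2, if_pos hm2b, PySem.Dict.insert_insert_self]]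
              rw [show pvStepB (st, pushes, false) c
                  = (st.insert (String.ofList [(PySem.Str.pyGet? ((PySem.List.pyGet? c 0).getD "") 0).getD ' ']) (((st.get? (String.ofList [(PySem.Str.pyGet? ((PySem.List.pyGet? c 0).getD "") 0).getD ' '])).getD ((0 : Int), (0 : Int))).1, ((PySem.Int.ofStr? (PySem.Str.slice ((PySem.List.pyGet? c 0).getD "") (some 2) none)).getD 0)),
                     (((PySem.List.pyGet? c 1).getD ""), st.insert (String.ofList [(PySem.Str.pyGet? ((PySem.List.pyGet? c 0).getD "") 0).getD ' ']) (((PySem.Int.ofStr? (PySem.Str.slice ((PySem.List.pyGet? c 0).getD "") (some 2) none)).getD 0) + 1, ((st.get? (String.ofList [(PySem.Str.pyGet? ((PySem.List.pyGet? c 0).getD "") 0).getD ' '])).getD ((0 : Int), (0 : Int))).2)) :: pushes, false) by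
                simp only [pvStepB, Bool.false_eq_true, if_false, if_neg hl1, if_neg hm1,
                  if_pos hm2, if_pos hm2b, if_neg (not_le.mpr hm2b)]]
              have H := ih hcs' (st.insert (String.ofList [(PySem.Str.pyGet? ((PySem.List.pyGet? c 0).getD "") 0).getD ' ']) (((st.get? (String.ofList [(PySem.Str.pyGet? ((PySem.List.pyGet? c 0).getD "") 0).getD ' '])).getD ((0 : Int), (0 : Int))).1, ((PySem.Int.ofStr? (PySem.Str.slice ((PySem.List.pyGet? c 0).getD "") (some 2) none)).getD 0))) (s + dfsA f (st.insert (String.ofList [(PySem.Str.pyGet? ((PySem.List.pyGet? c 0).getD "") 0).getD ' ']) (((PySem.Int.ofStr? (PySem.Str.slice ((PySem.List.pyGet? c 0).getD "") (some 2) none)).getD 0) + 1, ((st.get? (String.ofList [(PySem.Str.pyGet? ((PySem.List.pyGet? c 0).getD "") 0).getD ' '])).getD ((0 : Int), (0 : Int))).2)) ((PySem.List.pyGet? c 1).getD "") (PySem.Dict.mk W)) ((((PySem.List.pyGet? c 1).getD ""), (st.insert (String.ofList [(PySem.Str.pyGet? ((PySem.List.pyGet? c 0).getD "") 0).getD ' '])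 (((PySem.Int.ofStr? (PySem.Str.slice ((PySem.List.pyGet? c 0).getD "") (some 2) none)).getD 0) + 1, ((st.get? (String.ofList [(PySem.Str.pyGet? ((PySem.List.pyGet? c 0).getD "") 0).getD ' '])).getD ((0 : Int), (0 : Int))).2))) :: pushes) false
              dsimp only at H
              obtain ⟨hfl, hst, newp, hpush, hsum, hgood, hlen⟩ := H
              refine ⟨hfl, hst, newp ++ [(((PySem.List.pyGet? c 1).getD ""), (st.insert (String.ofList [(PySem.Str.pyGet? ((PySem.List.pyGet? c 0).getD "") 0).getD ' ']) (((PySem.Int.ofStr? (PySem.Str.slice ((PySem.List.pyGet? c 0).getD "") (some 2) none)).getD 0) + 1, ((st.get? (String.ofList [(PySem.Str.pyGet? ((PySem.List.pyGet? c 0).getD "") 0).getD ' '])).getD ((0 : Int), (0 : Int))).2)))], ?_, ?_, ?_, ?_⟩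
              · rw [hpush]; simp
              · rw [hsum, List.map_append, List.sum_append, hstabT (st.insert (String.ofList [(PySem.Str.pyGet? ((PySem.List.pyGet? c 0).getD "") 0).getD ' ']) (((PySem.Int.ofStr? (PySem.Str.slice ((PySem.List.pyGet? c 0).getD "") (some 2) none)).getD 0) + 1, ((st.get? (String.ofList [(PySem.Str.pyGet? ((PySem.List.pyGet? c 0).getD "") 0).getD ' '])).getD ((0 : Int), (0 : Int))).2))]
                simp; ring
              · intro p hp
                rcases List.mem_append.mp hp with h | h
                · exact hgood p h
                · rw [List.mem_singleton] at h; subst h; exact ⟨hgt, hwtt⟩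
              · simp only [List.length_append, List.length_cons, List.length_nil] at hlen ⊢
                omega
            · rw [show pvStepA (fun st nd => dfsA f st nd (PySem.Dict.mk W)) (st, s, false) c
                  = (st.insert (String.ofList [(PySem.Str.pyGet? ((PySem.List.pyGet? c 0).getD "") 0).getD ' ']) (((st.get? (String.ofList [(PySem.Str.pyGet? ((PySem.List.pyGet? c 0).getD "") 0).getD ' '])).getD ((0 : Int), (0 : Int))).1, ((st.get? (String.ofList [(PySem.Str.pyGet? ((PySem.List.pyGet? c 0).getD "") 0).getD ' '])).getD ((0 : Int), (0 : Int))).2),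
                     s + dfsA f (st.insert (String.ofList [(PySem.Str.pyGet? ((PySem.List.pyGet? c 0).getD "") 0).getD ' ']) (((st.get? (String.ofList [(PySem.Str.pyGet? ((PySem.List.pyGet? c 0).getD "") 0).getD ' '])).getD ((0 : Int), (0 : Int))).1, ((st.get? (String.ofList [(PySem.Str.pyGet? ((PySem.List.pyGet? c 0).getD "") 0).getD ' '])).getD ((0 : Int), (0 : Int))).2)) ((PySem.List.pyGet? c 1).getD "") (PySem.Dict.mk W), true) by
                simp only [pvStepA, pvReturnIntervals, Bool.false_eq_true, if_false, if_neg hl1,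
                  if_neg hm1, if_pos hm2, if_neg hm2b]]
              rw [show pvStepB (st, pushes, false) c
                  = (st, (((PySem.List.pyGet? c 1).getD ""), st.insert (String.ofList [(PySem.Str.pyGet? ((PySem.List.pyGet? c 0).getD "") 0).getD ' ']) (((st.get? (String.ofList [(PySem.Str.pyGet? ((PySem.List.pyGet? c 0).getD "") 0).getD ' '])).getD ((0 : Int), (0 : Int))).1, ((st.get? (String.ofList [(PySem.Str.pyGet? ((PySem.List.pyGet? c 0).getD "") 0).getD ' '])).getD ((0 : Int), (0 : Int))).2)) :: pushes, true) by
                simp only [pvStepB, Bool.false_eq_true, if_false, if_neg hl1, if_neg hm1,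
                  if_pos hm2, if_neg hm2b, if_pos (not_lt.mp hm2b)]]
              rw [pvStepA_frozen _ cmds _ rfl, pvStepB_frozen cmds _ rfl]
              refine ⟨rfl, fun h => by simp at h, ⟨[(((PySem.List.pyGet? c 1).getD ""), (st.insert (String.ofList [(PySem.Str.pyGet? ((PySem.List.pyGet? c 0).getD "") 0).getD ' ']) (((st.get? (String.ofList [(PySem.Str.pyGet? ((PySem.List.pyGet? c 0).getD "") 0).getD ' '])).getD ((0 : Int), (0 : Int))).1, ((st.get? (String.ofList [(PySem.Str.pyGet? ((PySem.List.pyGet? c 0).getD "") 0).getD ' '])).getD ((0 : Int), (0 : Int))).2)))], rfl, ?_, ?_, by simp⟩⟩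
              · rw [List.map_singleton, List.sum_singleton, hstabT (st.insert (String.ofList [(PySem.Str.pyGet? ((PySem.List.pyGet? c 0).getD "") 0).getD ' ']) (((st.get? (String.ofList [(PySem.Str.pyGet? ((PySem.List.pyGet? c 0).getD "") 0).getD ' '])).getD ((0 : Int), (0 : Int))).1, ((st.get? (String.ofList [(PySem.Str.pyGet? ((PySem.List.pyGet? c 0).getD "") 0).getD ' '])).getD ((0 : Int), (0 : Int))).2))]
              · intro p hp
                rw [List.mem_singleton] at hp; subst hp; exact ⟨hgt, hwtt⟩
          · -- the test can never fire: both loops leave everything unchanged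
            rw [show pvStepA (fun st nd => dfsA f st nd (PySem.Dict.mk W)) (st, s, false) c
                = (st, s, false) by
              simp only [pvStepA, pvReturnIntervals, Bool.false_eq_true, if_false, if_neg hl1,
                if_neg hm1, if_neg hm2]]
            rw [show pvStepB (st, pushes, false) c = (st, pushes, false) by
              simp only [pvStepB, Bool.false_eq_true, if_false, if_neg hl1, if_neg hm1,
                if_neg hm2]]
            have H := ih hcs' st s pushes false
            dsimp only at H
            obtain ⟨h1, h2, newp, h3, h4, h5, h6⟩ := H
            exact ⟨h1, h2, newp, h3, h4, h5, le_trans h6 (by simp)⟩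

-- (L3) B's stack loop computes the sum of A's values of the stack entries
theorem dfsB_inv (W : List (String × List (List String))) (K : List String)
    (hwf : pvWfOk K W) (hstab : PvStab W) (C : Nat)
    (hC : (W.map (fun w => w.2.length)).sum < C) :
    ∀ fuel stack total, (∀ p ∈ stack, pvOkTail W p.1) →
      (stack.map (fun p => (C + 1) ^ pvWt W p.1)).sum ≤ fuel →
      dfsB fuel (PySem.Dict.mk W) stack total
        = total + (stack.map (fun p => dfsA (pvWt W p.1 + 1) p.2 p.1 (PySem.Dict.mk W))).sum := by
  intro fuel
  induction fuel with
  | zero =>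
    intro stack total hg hm
    cases stack with
    | nil => simp [dfsB]
    | cons p rest =>
      exfalso
      have hpos : 0 < (C + 1) ^ pvWt W p.1 := pow_pos (by omega : 0 < C + 1) _
      simp only [List.map_cons, List.sum_cons, Nat.le_zero] at hm
      omega
  | succ f ih =>
    intro stack total hg hm
    cases stack with
    | nil => simp [dfsB]
    | cons p rest =>
      obtain ⟨n, st⟩ := p
      have hgn : pvOkTail W n := hg (n, st) (by simp)
      have hgrest : ∀ q ∈ rest, pvOkTail W q.1 := fun q hq => hg q (by simp [hq])
      by_cases hA : n = "A"
      · subst hA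
        have hw0 : pvWt W "A" = 0 := pvWt_A W
        simp only [List.map_cons, List.sum_cons, hw0, pow_zero] at hm
        simp only [dfsB, reduceIte]
        rw [ih rest (total + pvProdState st) hgrest (by omega)]
        have hval : dfsA (pvWt W "A" + 1) st "A" (PySem.Dict.mk W) = pvSumALeaf st := by
          rw [hw0]; simp [dfsA]
        simp only [List.map_cons, List.sum_cons, hval, pvProd_eq_sum_a_leaf]
        ring
      by_cases hR : n = "R"
      · subst hR
        have hw0 : pvWt W "R" = 0 := pvWt_R W
        simp only [List.map_cons, List.sum_cons, hw0, pow_zero] at hm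
        simp only [dfsB, reduceIte, if_neg (show ¬("R" = "A") by decide)]
        rw [ih rest total hgrest (by omega)]
        have hval : dfsA (pvWt W "R" + 1) st "R" (PySem.Dict.mk W) = 0 := by
          rw [hw0]; simp [dfsA, hA]
        simp only [List.map_cons, List.sum_cons, hval]
        ring
      rcases hgn with h | h | hmem
      · exact absurd h hA
      · exact absurd h hR
      obtain ⟨e, heW, he1, hget⟩ := pvFind_entry W n hmem
      have hcs : ∀ c ∈ e.2, pvOkTail W (pvCondTgt c) ∧ pvWt W (pvCondTgt c) < pvWt W n := by
        intro c hc
        refine ⟨(hwf e heW c hc).2, ?_⟩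
        exact pvWt_edge W hstab n hmem hA hR _ (by
          unfold pvTgts; rw [hget]; exact List.mem_map.mpr ⟨c, hc, rfl⟩)
      have Hc := pvFold_corr W K hwf hstab (pvWt W n) (pvWt W n) le_rfl e.2 hcs st 0 [] false
      dsimp only at Hc
      obtain ⟨hfl, hst, newp, hpush, hsum, hgoodp, hlen⟩ := Hc
      simp only [dfsB, if_neg hA, if_neg hR, hget, Option.getD_some]
      rw [hpush, List.append_nil]
      -- fuel accounting: the pushed entries cost strictly less than the popped one
      have hC1 : e.2.length ≤ (W.map (fun w => w.2.length)).sum := by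
        apply List.le_sum_of_mem
        exact List.mem_map.mpr ⟨e, heW, rfl⟩
      have hnewsum : (newp.map (fun p => (C + 1) ^ pvWt W p.1)).sum + 1 ≤ (C + 1) ^ pvWt W n := by
        by_cases hnp : newp = []
        · subst hnp
          simpa using Nat.one_le_pow _ _ (by omega : 0 < C + 1)
        · obtain ⟨p0, hp0⟩ := List.exists_mem_of_ne_nil newp hnp
          have hw1 : 1 ≤ pvWt W n := by
            have := (hgoodp p0 hp0).2
            omega
          have hb : ∀ x ∈ newp.map (fun p => (C + 1) ^ pvWt W p.1),
              x ≤ (C + 1) ^ (pvWt W n - 1) := by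
            intro x hx
            obtain ⟨p, hp, rfl⟩ := List.mem_map.mp hx
            exact Nat.pow_le_pow_right (by omega) (by have := (hgoodp p hp).2; omega)
          have hs1 : (newp.map (fun p => (C + 1) ^ pvWt W p.1)).sum
              ≤ newp.length * (C + 1) ^ (pvWt W n - 1) := by
            simpa using List.sum_le_card_nsmul _ _ hb
          have hP1 : 1 ≤ (C + 1) ^ (pvWt W n - 1) := Nat.one_le_pow _ _ (by omega)
          have hpow : (C + 1) ^ pvWt W n = (C + 1) ^ (pvWt W n - 1) * (C + 1) := by
            rw [← pow_succ]
            congr 1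
            omega
          rw [hpow, Nat.mul_comm]
          calc (newp.map (fun p => (C + 1) ^ pvWt W p.1)).sum + 1
              ≤ newp.length * (C + 1) ^ (pvWt W n - 1) + (C + 1) ^ (pvWt W n - 1) :=
                Nat.add_le_add hs1 hP1
            _ = (newp.length + 1) * (C + 1) ^ (pvWt W n - 1) := (Nat.succ_mul _ _).symm
            _ ≤ (C + 1) * (C + 1) ^ (pvWt W n - 1) := Nat.mul_le_mul_right _ (by omega)
      have hmeas : ((newp ++ rest).map (fun p => (C + 1) ^ pvWt W p.1)).sum ≤ f := by
        simp only [List.map_cons, List.sum_cons] at hm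
        simp only [List.map_append, List.sum_append]
        omega
      rw [ih (newp ++ rest) total (by
        intro q hq
        rcases List.mem_append.mp hq with h | h
        · exact (hgoodp q h).1
        · exact hgrest q h) hmeas]
      have hval : dfsA (pvWt W n + 1) st n (PySem.Dict.mk W)
          = (newp.map (fun p => dfsA (pvWt W p.1 + 1) p.2 p.1 (PySem.Dict.mk W))).sum := by
        rw [dfsA_succ, if_neg hA, if_neg hR, hget]
        simp only [Option.getD_some]
        rw [hsum]; simp
      simp only [List.map_append, List.sum_append, List.map_cons, List.sum_cons, hval]

-- ===== VERDICT (by name: the statement is the Claim_ definition above) =====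
theorem dfs_spec : Claim_equal_dfs := by
  intro state node workflows _ hPre
  obtain ⟨hndS, hPre⟩ := hPre
  unfold Spec_dfs dfs dfs_alt
  dsimp only
  rcases hPre with hA | hR | ⟨hmem, hndW, hwf, hstab⟩
  · subst hA
    obtain ⟨f, hf⟩ : ∃ f, ((List.foldl (· + ·) 0 (workflows.map fun w => w.2.length) + 1) + 1)
        ^ (workflows.length + 2) = f + 1 :=
      ⟨_ - 1, (Nat.succ_pred_eq_of_pos (pow_pos (by omega : 0 < List.foldl (· + ·) 0 (workflows.map fun w => w.2.length) + 1 + 1) _)).symm⟩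
    rw [hf]
    simp only [dfsB, reduceIte, dfsB_nil]
    simp [dfsA, pvProd_eq_sum_a_leaf]
  · subst hR
    obtain ⟨f, hf⟩ : ∃ f, ((List.foldl (· + ·) 0 (workflows.map fun w => w.2.length) + 1) + 1)
        ^ (workflows.length + 2) = f + 1 :=
      ⟨_ - 1, (Nat.succ_pred_eq_of_pos (pow_pos (by omega : 0 < List.foldl (· + ·) 0 (workflows.map fun w => w.2.length) + 1 + 1) _)).symm⟩
    rw [hf]
    simp only [dfsB, reduceIte, if_neg (show ¬("R" = "A") by decide), dfsB_nil]
    simp [dfsA]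
  have hok : pvOkTail workflows node := Or.inr (Or.inr hmem)
  have hsum : (workflows.map (fun w => w.2.length)).sum
      = (workflows.map (fun w => w.2.length)).foldl (· + ·) 0 := List.sum_eq_foldl_nat
  have hC : (workflows.map (fun w => w.2.length)).sum
      < (workflows.map (fun w => w.2.length)).foldl (· + ·) 0 + 1 := by omega
  have hwtle : pvWt workflows node ≤ workflows.length + 1 := pvWt_le workflows node
  rw [dfsB_inv workflows (state.map (·.1)) hwf hstab _ hC
        _ [(node, PySem.Dict.mk state)] 0
        (by intro p hp; rw [List.mem_singleton] at hp; subst hp; exact hok)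
        (by
          simp only [List.map_cons, List.map_nil, List.sum_cons, List.sum_nil, add_zero]
          exact Nat.pow_le_pow_right (by omega) (by omega))]
  simp only [List.map_cons, List.map_nil, List.sum_cons, List.sum_nil, add_zero, zero_add]
  exact dfsA_stable workflows (state.map (·.1)) hwf hstab node hok (PySem.Dict.mk state)
    (workflows.length + 2) (pvWt workflows node + 1) (by omega) (by omega)
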